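-- pv_equiv track=rewrite | github.com/danielrmrtns/auto-dxcc | autodxcc.py | countries_before_callsign
-- ===== SOURCE A (Python) =====
-- def countries_before_callsign(lines, callsign):
--     """Find the number of countries that appears before a given callsign, in a list of lines."""
--     countries = None
--     for line in lines:
--         if line.isdigit() and len(line) >= 3:  # number always >= 100
--             countries = int(line)
--         elif callsign in line:
--             return countries
--     return None
-- ===== SOURCE B (Python) =====
-- def countries_before_callsign(lines, callsign):
--     """Find the number of countries that appears before a given callsign, in a list of lines."""
--     def is_count(line):
--         return line.isdigit() and len(line) >= 3
--     idx = next((i for i, line in enumerate(lines)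
--                 if callsign in line and not is_count(line)), None)
--     if idx is None:
--         return None
--     for line in reversed(lines[:idx]):
--         if is_count(line):
--             return int(line)
--     return None
-- ===== Notes on version B (the rewrite author's own statement) =====
-- stated objective: alternative
-- what changed: Replaces A's single fused early-return loop with an accumulator by a locate-then-backscan pair of passes: first find the index of the callsign line, then scan backwards from it for the last count line.
import Mathlib
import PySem

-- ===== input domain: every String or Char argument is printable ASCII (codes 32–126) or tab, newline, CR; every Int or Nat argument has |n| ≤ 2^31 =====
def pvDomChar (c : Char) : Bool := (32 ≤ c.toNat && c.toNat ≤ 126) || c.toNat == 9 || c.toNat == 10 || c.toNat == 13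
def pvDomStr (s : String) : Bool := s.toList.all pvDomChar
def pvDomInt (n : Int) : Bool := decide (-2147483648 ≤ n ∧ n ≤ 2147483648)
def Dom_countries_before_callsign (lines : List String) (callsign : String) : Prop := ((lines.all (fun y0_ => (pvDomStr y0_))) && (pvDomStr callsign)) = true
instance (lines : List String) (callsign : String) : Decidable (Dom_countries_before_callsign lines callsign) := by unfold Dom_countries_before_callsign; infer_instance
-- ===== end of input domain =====

-- B replaces A's fused early-return loop with a locate-then-backscan pair of passes (alternative decomposition, same cost).

-- ===== PORT A =====
-- A's loop: carries the 'countries' accumulator, early-returns on a callsign hit.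
def countries_before_callsign_go (callsign : String) : List String → Option Int → Option Int
  | [], _ => none
  | line :: rest, countries =>
    if PySem.Str.strIsdigit line && decide (3 ≤ PySem.Str.len line) then
      -- countries = int(line); int() always succeeds on an all-digit line
      countries_before_callsign_go callsign rest (PySem.Int.ofStr? line)
    else if PySem.Str.isIn callsign line then
      countries
    else
      countries_before_callsign_go callsign rest countries

def countries_before_callsign (lines : List String) (callsign : String) : Option Int :=
  countries_before_callsign_go callsign lines none

-- ===== PORT B =====
def pvIsCount (line : String) : Bool :=
  PySem.Str.strIsdigit line && decide (3 ≤ PySem.Str.len line)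

def countries_before_callsign_alt (lines : List String) (callsign : String) : Option Int :=
  match lines.findIdx? (fun line => PySem.Str.isIn callsign line && !pvIsCount line) with
  | none => none
  | some idx =>
    match ((lines.take idx).reverse.find? pvIsCount) with
    | some line => PySem.Int.ofStr? line
    | none => none

-- ===== PRECONDITION & SPEC =====
def Spec_countries_before_callsign (lines : List String) (callsign : String) (out : Option Int) : Prop := out = countries_before_callsign_alt lines callsign
instance (lines : List String) (callsign : String) (out : Option Int) : Decidable (Spec_countries_before_callsign lines callsign out) := by unfold Spec_countries_before_callsign; infer_instance

-- ===== CLAIM (what is proved, stated in full; the proofs are below) =====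
def Claim_equal_countries_before_callsign : Prop := ∀ (lines : List String) (callsign : String), Dom_countries_before_callsign lines callsign → Spec_countries_before_callsign lines callsign (countries_before_callsign lines callsign)

-- ===== LEMMAS AND PROOFS =====

-- Loop invariant: A's loop with accumulator `acc` equals B's locate-then-backscan
-- on the remaining lines, with `acc` as the fallback when no count line precedes the hit.
theorem countries_before_callsign_go_eq (callsign : String) (lines : List String)
    (acc : Option Int) :
    countries_before_callsign_go callsign lines acc =
      match lines.findIdx? (fun line => PySem.Str.isIn callsign line && !pvIsCount line) with
      | none => none
      | some idx =>
        match ((lines.take idx).reverse.find? pvIsCount) with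
        | some line => PySem.Int.ofStr? line
        | none => acc := by
  induction lines generalizing acc with
  | nil => simp [countries_before_callsign_go]
  | cons l ls ih =>
    rw [countries_before_callsign_go, List.findIdx?_cons]
    by_cases hc : pvIsCount l = true
    · have hc' : (PySem.Str.strIsdigit l && decide (3 ≤ PySem.Str.len l)) = true := hc
      have hp : (PySem.Str.isIn callsign l && !pvIsCount l) = false := by
        rw [hc]; exact Bool.and_false _
      rw [if_pos hc', if_neg (by rw [hp]; simp), ih]
      cases h : ls.findIdx? (fun line => PySem.Str.isIn callsign line && !pvIsCount line) with
      | none => simp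
      | some idx =>
        simp only [Option.map_some]
        rw [List.take_succ_cons, List.reverse_cons, List.find?_append]
        cases h2 : (ls.take idx).reverse.find? pvIsCount with
        | some line => rfl
        | none => simp only [Option.none_or, List.find?_singleton]; rw [if_pos hc]
    · have hc' : ¬ ((PySem.Str.strIsdigit l && decide (3 ≤ PySem.Str.len l)) = true) := hc
      rw [if_neg hc']
      by_cases hin : PySem.Str.isIn callsign l = true
      · have hp : (PySem.Str.isIn callsign l && !pvIsCount l) = true := by
          rw [hin, Bool.eq_false_iff.mpr hc]; rfl
        rw [if_pos hin, if_pos hp]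
        simp
      · have hp : (PySem.Str.isIn callsign l && !pvIsCount l) = false := by
          rw [Bool.eq_false_iff.mpr hin]; exact Bool.false_and _
        rw [if_neg hin, if_neg (by rw [hp]; simp), ih]
        cases h : ls.findIdx? (fun line => PySem.Str.isIn callsign line && !pvIsCount line) with
        | none => simp
        | some idx =>
          simp only [Option.map_some]
          rw [List.take_succ_cons, List.reverse_cons, List.find?_append]
          cases h2 : (ls.take idx).reverse.find? pvIsCount with
          | some line => rfl
          | none => simp only [Option.none_or, List.find?_singleton]; rw [if_neg hc]

-- ===== VERDICT (by name: the statement is the Claim_ definition above) =====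
theorem countries_before_callsign_spec : Claim_equal_countries_before_callsign := by
  intro lines callsign _
  unfold Spec_countries_before_callsign countries_before_callsign countries_before_callsign_alt
  rw [countries_before_callsign_go_eq]
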